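-- pv_equiv track=rewrite | github.com/hellasleeper108/bigO | big_o_sandbox.py | linearithmic_time
-- ===== SOURCE A (Python) =====
-- def linearithmic_time(n):
--     count = 0
--     limit = n
--     for i in range(n):
--         temp = limit
--         while temp > 1:
--             temp //= 2
--             count += 1
--     return count
-- ===== SOURCE B (Python) =====
-- def linearithmic_time(n):
--     return n * (n.bit_length() - 1) if n >= 1 else 0
-- ===== Notes on version B (the rewrite author's own statement) =====
-- stated objective: faster
-- what changed: Replaces the nested loops (n iterations, each halving the limit down to one) by the closed form n*(bit_length(n)-1), i.e. n times floor(log2 n).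
import Mathlib
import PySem

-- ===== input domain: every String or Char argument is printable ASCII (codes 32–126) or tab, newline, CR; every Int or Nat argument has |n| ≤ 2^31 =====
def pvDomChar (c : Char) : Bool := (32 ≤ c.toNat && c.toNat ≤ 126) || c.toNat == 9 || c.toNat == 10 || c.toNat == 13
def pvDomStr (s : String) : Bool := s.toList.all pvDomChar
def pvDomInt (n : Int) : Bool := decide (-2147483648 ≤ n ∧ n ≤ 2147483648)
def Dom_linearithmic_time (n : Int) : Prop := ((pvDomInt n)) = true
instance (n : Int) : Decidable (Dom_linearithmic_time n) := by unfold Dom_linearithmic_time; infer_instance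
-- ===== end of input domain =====

-- B replaces A's nested loops by the closed form n*(bit_length(n)-1) for n>=1, else 0 (objective: faster).

-- ===== PORT A =====
-- the inner 'while temp > 1: temp //= 2; count += 1' loop of A
def pvWhileHalve (temp count : Int) : Int :=
  if h : temp > 1 then pvWhileHalve (PySem.Int.floordiv temp 2) (count + 1) else count
termination_by temp.toNat
decreasing_by
  simp only [PySem.Int.floordiv]
  rw [Int.fdiv_eq_ediv_of_nonneg _ (by omega : (0:Int) ≤ 2)]
  omega

def linearithmic_time (n : Int) : Int :=
  (PySem.List.pyRange 0 n 1).foldl (fun count _ => pvWhileHalve n count) 0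

-- ===== PORT B =====
-- port of Python's int.bit_length for nonnegative ints
def pvBitLength (m : Nat) : Nat :=
  if m = 0 then 0 else pvBitLength (m / 2) + 1
decreasing_by omega

def linearithmic_time_alt (n : Int) : Int :=
  if n ≥ 1 then n * ((pvBitLength n.toNat : Int) - 1) else 0

-- ===== PRECONDITION & SPEC =====
def Spec_linearithmic_time (n : Int) (out : Int) : Prop := out = linearithmic_time_alt n
instance (n : Int) (out : Int) : Decidable (Spec_linearithmic_time n out) := by unfold Spec_linearithmic_time; infer_instance

-- ===== CLAIM (what is proved, stated in full; the proofs are below) =====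
def Claim_equal_linearithmic_time : Prop := ∀ (n : Int), Dom_linearithmic_time n → Spec_linearithmic_time n (linearithmic_time n)

-- ===== LEMMAS AND PROOFS =====

theorem pvWhileHalve_step {t : Int} (h : t > 1) (c : Int) :
    pvWhileHalve t c = pvWhileHalve (PySem.Int.floordiv t 2) (c + 1) := by
  rw [pvWhileHalve]; exact dif_pos h

theorem pvWhileHalve_base {t : Int} (h : ¬ t > 1) (c : Int) : pvWhileHalve t c = c := by
  rw [pvWhileHalve]; exact dif_neg h

theorem pvWhileHalve_shift (t c : Int) : pvWhileHalve t c = c + pvWhileHalve t 0 := by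
  by_cases h : t > 1
  · rw [pvWhileHalve_step h c, pvWhileHalve_step h 0,
      pvWhileHalve_shift (PySem.Int.floordiv t 2) (c + 1),
      pvWhileHalve_shift (PySem.Int.floordiv t 2) (0 + 1)]
    ring
  · rw [pvWhileHalve_base h c, pvWhileHalve_base h 0]
    ring
termination_by t.toNat
decreasing_by
  all_goals
    simp only [PySem.Int.floordiv]
    rw [Int.fdiv_eq_ediv_of_nonneg _ (by omega : (0:Int) ≤ 2)]
    omega

theorem pvWhileHalve_bits (t : Int) (h1 : 1 ≤ t) :
    pvWhileHalve t 0 = (pvBitLength t.toNat : Int) - 1 := by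
  by_cases h : t > 1
  · have hfd : PySem.Int.floordiv t 2 = t / 2 := by
      simp only [PySem.Int.floordiv]
      rw [Int.fdiv_eq_ediv_of_nonneg _ (by omega : (0:Int) ≤ 2)]
    have hge : 1 ≤ PySem.Int.floordiv t 2 := by rw [hfd]; omega
    rw [pvWhileHalve_step h 0, pvWhileHalve_shift,
      pvWhileHalve_bits (PySem.Int.floordiv t 2) hge]
    have htn : (PySem.Int.floordiv t 2).toNat = t.toNat / 2 := by rw [hfd]; omega
    rw [htn]
    have hnz : ¬ t.toNat = 0 := by omega
    have hrec : pvBitLength t.toNat = pvBitLength (t.toNat / 2) + 1 := by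
      rw [pvBitLength]; exact if_neg hnz
    rw [hrec]
    push_cast
    ring
  · have ht1 : t = 1 := by omega
    subst ht1
    rw [pvWhileHalve_base h 0]
    have e0 : pvBitLength 0 = 0 := by rw [pvBitLength]; simp
    have e1 : pvBitLength (1 : Int).toNat = 1 := by rw [pvBitLength]; norm_num [e0]
    rw [e1]
    norm_num
termination_by t.toNat
decreasing_by
  simp only [PySem.Int.floordiv]
  rw [Int.fdiv_eq_ediv_of_nonneg _ (by omega : (0:Int) ≤ 2)]
  omega

theorem foldl_const_add (K : Int) (l : List Int) : ∀ acc : Int,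
    l.foldl (fun c _ => c + K) acc = acc + l.length * K := by
  induction l with
  | nil => intro acc; simp
  | cons x xs ih => intro acc; simp [List.foldl, ih]; ring

-- ===== VERDICT (by name: the statement is the Claim_ definition above) =====
theorem linearithmic_time_spec : Claim_equal_linearithmic_time := by
  intro n _
  unfold Spec_linearithmic_time linearithmic_time linearithmic_time_alt
  have hfold : (PySem.List.pyRange 0 n 1).foldl (fun count _ => pvWhileHalve n count) 0
      = (PySem.List.pyRange 0 n 1).length * pvWhileHalve n 0 := by
    have : (fun (count : Int) (_ : Int) => pvWhileHalve n count)
        = (fun (c : Int) (_ : Int) => c + pvWhileHalve n 0) := by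
      funext c x; exact pvWhileHalve_shift n c
    rw [this, foldl_const_add]; ring
  rw [hfold, PySem.List.length_pyRange_one]
  by_cases h : n ≥ 1
  · rw [if_pos h, pvWhileHalve_bits n h]
    have : ((n - 0).toNat : Int) = n := by omega
    rw [this]
  · rw [if_neg h]
    have h0 : pvWhileHalve n 0 = 0 := pvWhileHalve_base (by omega) 0
    rw [h0]; ring
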